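-- pv_equiv track=rewrite | github.com/TheKetan2/Programming-Practice | edabitPython/is_alternating_number.py | is_alternating
-- ===== SOURCE A (Python) =====
-- def is_alternating(num):
-- 	odd = 90
-- 	if num <=0:
-- 		return False
-- 	for n in list(str(num)):
-- 		if odd == 90:
-- 			odd = int(n)%2
-- 		elif odd != int(n)%2:
-- 			odd = int(n)%2
-- 		else:
-- 			return False
-- 	return True
-- ===== SOURCE B (Python) =====
-- def is_alternating(num):
--     if num <= 0:
--         return False
--     n = num
--     while n >= 10:
--         if (n % 10 + n // 10 % 10) % 2 == 0:
--             return False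
--         n //= 10
--     return True
-- ===== Notes on version B (the rewrite author's own statement) =====
-- stated objective: alternative
-- what changed: B never builds the decimal string: it peels digits off the number arithmetically (n % 10, n // 10) from the least-significant end, returning False as soon as two adjacent digits have an even sum, instead of A's left-to-right walk over list(str(num)) carrying the previous digit's parity behind a sentinel start value.
import Mathlib
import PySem

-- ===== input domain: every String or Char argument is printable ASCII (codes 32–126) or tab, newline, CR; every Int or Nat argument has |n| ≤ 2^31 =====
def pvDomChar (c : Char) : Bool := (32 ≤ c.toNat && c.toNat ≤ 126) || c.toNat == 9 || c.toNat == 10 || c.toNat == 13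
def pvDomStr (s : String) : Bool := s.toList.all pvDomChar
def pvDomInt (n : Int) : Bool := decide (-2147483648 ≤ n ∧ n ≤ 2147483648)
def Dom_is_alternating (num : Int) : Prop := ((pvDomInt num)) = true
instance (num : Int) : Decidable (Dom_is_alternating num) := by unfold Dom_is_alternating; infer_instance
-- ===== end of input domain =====

-- B replaces A's walk over list(str(num)) (previous-parity state behind a sentinel start value) by pure
-- arithmetic: it peels digits off the number with % 10 and // 10 and rejects as soon as two
-- adjacent digits have an even sum; same return value on every input.

-- ===== PORT A =====
-- int(n) % 2 for a one-character string n; chars come from str(num) with num > 0, so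
-- ofChars? never returns none there (the .getD 0 is unreachable).
def pvDigMod2 (c : Char) : Int :=
  PySem.Int.mod ((PySem.Int.ofChars? [c]).getD 0) 2

-- the for-loop of A: state 'odd' starting at the sentinel, early 'return False' as result false
def pvALoop : Int → List Char → Bool
  | _, [] => true
  | odd, c :: rest =>
    if odd == 90 then pvALoop (pvDigMod2 c) rest
    else if odd != pvDigMod2 c then pvALoop (pvDigMod2 c) rest
    else false

def is_alternating (num : Int) : Bool :=
  if num ≤ 0 then false
  else pvALoop 90 (PySem.Int.toStr num).toList

-- ===== PORT B =====
-- the while-loop of B: n >= 10 → test (n % 10 + n // 10 % 10) % 2 == 0, else n //= 10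
def pvBLoop (n : Int) : Bool :=
  if _h : 10 ≤ n then
    if PySem.Int.mod (PySem.Int.mod n 10 + PySem.Int.mod (PySem.Int.floordiv n 10) 10) 2 = 0 then
      false
    else pvBLoop (PySem.Int.floordiv n 10)
  else true
termination_by n.toNat
decreasing_by
  have hd := PySem.Int.floordiv_eq_ediv_of_pos (a := n) (b := 10) (by omega)
  have : n / 10 < n := by omega
  omega

def is_alternating_alt (num : Int) : Bool :=
  if num ≤ 0 then false
  else pvBLoop num

-- ===== PRECONDITION & SPEC =====
def Spec_is_alternating (num : Int) (out : Bool) : Prop := out = is_alternating_alt num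
instance (num : Int) (out : Bool) : Decidable (Spec_is_alternating num out) := by unfold Spec_is_alternating; infer_instance

-- ===== CLAIM (what is proved, stated in full; the proofs are below) =====
def Claim_equal_is_alternating : Prop := ∀ (num : Int), Dom_is_alternating num → Spec_is_alternating num (is_alternating num)

-- ===== LEMMAS AND PROOFS =====

-- proof-side reference predicate: every two ADJACENT chars have different digit parity
def pvAdj : List Char → Bool
  | a :: b :: rest => (pvDigMod2 a != pvDigMod2 b) && pvAdj (b :: rest)
  | _ => true

-- Nat mirror of pvBLoop
def pvChkNat (m : Nat) : Bool :=
  if 10 ≤ m then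
    if (m % 10 + m / 10 % 10) % 2 = 0 then false else pvChkNat (m / 10)
  else true
termination_by m
decreasing_by exact Nat.div_lt_self (by omega) (by omega)

theorem pvDigMod2_cases (c : Char) : pvDigMod2 c = 0 ∨ pvDigMod2 c = 1 := by
  have h1 := PySem.Int.mod_nonneg ((PySem.Int.ofChars? [c]).getD 0) (b := 2) (by omega)
  have h2 := PySem.Int.mod_lt ((PySem.Int.ofChars? [c]).getD 0) (b := 2) (by omega)
  unfold pvDigMod2
  omega

-- A's loop, once past the sentinel, is the adjacent-parity check
theorem pvALoop_eq_adj (l : List Char) (a : Char) :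
    pvALoop (pvDigMod2 a) l = pvAdj (a :: l) := by
  induction l generalizing a with
  | nil => rcases pvDigMod2_cases a with h | h <;> simp [pvALoop, pvAdj]
  | cons b rest ih =>
    have hne : ¬ (pvDigMod2 a == 90) = true := by
      rcases pvDigMod2_cases a with h | h <;> simp [h]
    by_cases hab : (pvDigMod2 a != pvDigMod2 b) = true <;>
      simp [pvALoop, pvAdj, hne, hab, ih b]

theorem pvALoop_sentinel (l : List Char) (h : l ≠ []) : pvALoop 90 l = pvAdj l := by
  cases l with
  | nil => exact absurd rfl h
  | cons c rest =>
    show pvALoop 90 (c :: rest) = pvAdj (c :: rest)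
    rw [show pvALoop 90 (c :: rest) = pvALoop (pvDigMod2 c) rest from by simp [pvALoop]]
    exact pvALoop_eq_adj rest c

-- toDigitsCore pushes its accumulator to the right
theorem pvToDigitsCore_shift (f : Nat) : ∀ (n : Nat) (acc : List Char),
    Nat.toDigitsCore 10 f n acc = Nat.toDigitsCore 10 f n [] ++ acc := by
  induction f with
  | zero => intro n acc; simp [Nat.toDigitsCore]
  | succ f ih =>
    intro n acc
    simp only [Nat.toDigitsCore]
    by_cases h : n / 10 = 0
    · simp [h]
    · simp only [h, if_false]
      rw [ih (n / 10) ((n % 10).digitChar :: acc), ih (n / 10) [(n % 10).digitChar]]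
      simp

-- enough fuel makes the fuel irrelevant
theorem pvToDigitsCore_fuel (n : Nat) : ∀ (f1 f2 : Nat) (acc : List Char), n < f1 → n < f2 →
    Nat.toDigitsCore 10 f1 n acc = Nat.toDigitsCore 10 f2 n acc := by
  induction n using Nat.strong_induction_on with
  | _ n ih =>
    intro f1 f2 acc h1 h2
    match f1, f2 with
    | f1 + 1, f2 + 1 =>
      simp only [Nat.toDigitsCore]
      by_cases h : n / 10 = 0
      · simp [h]
      · simp only [h, if_false]
        have hn : 0 < n := by
          rcases Nat.eq_zero_or_pos n with h0 | h0
          · exact absurd (by simp [h0]) h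
          · exact h0
        have hlt : n / 10 < n := Nat.div_lt_self hn (by omega)
        exact ih (n / 10) hlt f1 f2 _ (by omega) (by omega)

-- str(m) for m < 10 is the single digit char
theorem pvToDigits_small (m : Nat) (h : m < 10) :
    Nat.toDigits 10 m = [Nat.digitChar m] := by
  have h0 : m / 10 = 0 := Nat.div_eq_of_lt h
  have hm : m % 10 = m := Nat.mod_eq_of_lt h
  simp [Nat.toDigits, Nat.toDigitsCore, h0, hm]

-- str(m) for m ≥ 10 ends with the last digit
theorem pvToDigits_step (m : Nat) (h : 10 ≤ m) :
    Nat.toDigits 10 m = Nat.toDigits 10 (m / 10) ++ [Nat.digitChar (m % 10)] := by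
  have h0 : ¬ m / 10 = 0 := by
    have := Nat.le_div_iff_mul_le (k := 10) (by omega) (x := m) (y := 1)
    omega
  have hm : 0 < m := by omega
  show Nat.toDigitsCore 10 (m + 1) m [] = _
  simp only [Nat.toDigitsCore, h0, if_false]
  rw [pvToDigitsCore_shift m (m / 10) [(m % 10).digitChar],
    pvToDigitsCore_fuel (m / 10) m (m / 10 + 1) []
      (by have := Nat.div_lt_self hm (by omega : (1:Nat) < 10); omega) (by omega)]
  rfl

theorem pvToDigits_ne_nil (m : Nat) : Nat.toDigits 10 m ≠ [] := by
  by_cases h : 10 ≤ m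
  · rw [pvToDigits_step m h]; simp
  · rw [pvToDigits_small m (by omega)]; simp

theorem pvToDigits_getLast? (m : Nat) :
    (Nat.toDigits 10 m).getLast? = some (Nat.digitChar (m % 10)) := by
  by_cases h : 10 ≤ m
  · rw [pvToDigits_step m h, List.getLast?_concat]
  · rw [pvToDigits_small m (by omega), Nat.mod_eq_of_lt (by omega)]; rfl

-- parity of int(c) for a digit char
theorem pvDigMod2_digitChar (d : Nat) (h : d < 10) :
    pvDigMod2 (Nat.digitChar d) = ((d % 2 : Nat) : Int) := by
  interval_cases d <;> decide

-- appending one char to a nonempty list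
theorem pvAdj_concat (l : List Char) (x : Char) :
    pvAdj (l ++ [x]) =
      (pvAdj l && (match l.getLast? with
        | none => true
        | some y => pvDigMod2 y != pvDigMod2 x)) := by
  induction l with
  | nil => simp [pvAdj]
  | cons a l ih =>
    cases l with
    | nil => simp [pvAdj]
    | cons b l2 =>
      show pvAdj (a :: b :: (l2 ++ [x])) = _
      simp only [pvAdj, List.getLast?_cons_cons]
      rw [show b :: (l2 ++ [x]) = (b :: l2) ++ [x] from rfl, ih, Bool.and_assoc]

-- B's digit-peeling loop is the adjacent-parity check on the decimal string
theorem pvChkNat_eq_adj (m : Nat) (hm : 0 < m) :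
    pvChkNat m = pvAdj (Nat.toDigits 10 m) := by
  induction m using Nat.strong_induction_on with
  | _ m ih =>
    by_cases h : 10 ≤ m
    · have hq : 0 < m / 10 := by
        have := Nat.le_div_iff_mul_le (k := 10) (by omega) (x := m) (y := 1)
        omega
      have hlt : m / 10 < m := Nat.div_lt_self (by omega) (by omega)
      rw [pvToDigits_step m h, pvAdj_concat, pvToDigits_getLast?]
      show pvChkNat m = (pvAdj (Nat.toDigits 10 (m / 10)) &&
        (pvDigMod2 (Nat.digitChar (m / 10 % 10)) != pvDigMod2 (Nat.digitChar (m % 10))))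
      rw [← ih (m / 10) hlt hq,
        pvDigMod2_digitChar (m / 10 % 10) (Nat.mod_lt _ (by omega)),
        pvDigMod2_digitChar (m % 10) (Nat.mod_lt _ (by omega))]
      conv_lhs => rw [pvChkNat]
      simp only [h, if_true]
      by_cases hp : (m % 10 + m / 10 % 10) % 2 = 0
      · have he : m / 10 % 10 % 2 = m % 10 % 2 := by omega
        simp [hp, he]
      · have hne : ¬ (m / 10 % 10 % 2 : Nat) = m % 10 % 2 := by omega
        have hb : (((m / 10 % 10 % 2 : Nat) : Int) != ((m % 10 % 2 : Nat) : Int)) = true := by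
          simp only [bne_iff_ne, ne_eq]
          exact_mod_cast hne
        rw [if_neg hp, hb, Bool.and_true]
    · rw [pvToDigits_small m (by omega)]
      unfold pvChkNat
      simp [h, pvAdj]

-- the Int loop computes its Nat mirror
theorem pvBLoop_natCast (m : Nat) : pvBLoop (m : Int) = pvChkNat m := by
  induction m using Nat.strong_induction_on with
  | _ m ih =>
    unfold pvBLoop pvChkNat
    by_cases h : 10 ≤ m
    · have hI : (10 : Int) ≤ (m : Int) := by exact_mod_cast h
      have hlt : m / 10 < m := Nat.div_lt_self (by omega) (by omega)
      have e1 : PySem.Int.mod (m : Int) 10 = ((m % 10 : Nat) : Int) := by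
        exact_mod_cast PySem.Int.mod_natCast m 10
      have e2 : PySem.Int.floordiv (m : Int) 10 = ((m / 10 : Nat) : Int) := by
        exact_mod_cast PySem.Int.floordiv_natCast m 10
      have e3 : PySem.Int.mod ((m / 10 : Nat) : Int) 10 = ((m / 10 % 10 : Nat) : Int) := by
        exact_mod_cast PySem.Int.mod_natCast (m / 10) 10
      have e4 : PySem.Int.mod ((m % 10 + m / 10 % 10 : Nat) : Int) 2
          = ((( m % 10 + m / 10 % 10) % 2 : Nat) : Int) := by
        exact_mod_cast PySem.Int.mod_natCast (m % 10 + m / 10 % 10) 2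
      simp only [hI, h, dif_pos, if_true]
      rw [e1, e2, e3, show ((m % 10 : Nat) : Int) + ((m / 10 % 10 : Nat) : Int)
            = ((m % 10 + m / 10 % 10 : Nat) : Int) by push_cast; ring, e4]
      by_cases hp : (m % 10 + m / 10 % 10) % 2 = 0
      · simp [hp]
      · have : ¬ ((m % 10 + m / 10 % 10) % 2 : Nat) = (0 : Nat) := hp
        simp only [if_neg hp]
        rw [if_neg (by exact_mod_cast this)]
        exact ih (m / 10) hlt
    · have hI : ¬ (10 : Int) ≤ (m : Int) := by exact_mod_cast h
      simp [hI, h]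

-- ===== VERDICT (by name: the statement is the Claim_ definition above) =====
theorem is_alternating_spec : Claim_equal_is_alternating := by
  intro num _
  show is_alternating num = is_alternating_alt num
  unfold is_alternating is_alternating_alt
  by_cases h : num ≤ 0
  · simp [h]
  · simp only [if_neg h]
    have hm : ((num.toNat : Nat) : Int) = num := Int.toNat_of_nonneg (by omega)
    rw [PySem.Int.toList_toStr]
    rw [show PySem.Int.toChars num = Nat.toDigits 10 num.toNat from by
      simp [PySem.Int.toChars, show ¬ num < 0 by omega]]
    rw [pvALoop_sentinel _ (pvToDigits_ne_nil _),
      show pvBLoop num = pvChkNat num.toNat from by rw [← hm, pvBLoop_natCast, Int.toNat_natCast],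
      pvChkNat_eq_adj num.toNat (by omega)]
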